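-- pv_equiv track=rewrite | github.com/robotocore/robotocore | src/robotocore/services/iot/rule_engine.py | _split_select_fields
-- ===== SOURCE A (Python) =====
-- def _split_select_fields(select_part: str) -> list[str]:
--     """Split SELECT fields by comma, respecting parentheses."""
--     fields = []
--     depth = 0
--     current = ""
--     for ch in select_part:
--         if ch == "(":
--             depth += 1
--             current += ch
--         elif ch == ")":
--             depth -= 1
--             current += ch
--         elif ch == "," and depth == 0:
--             fields.append(current)
--             current = ""
--         else:
--             current += ch
--     if current.strip():
--         fields.append(current)
--     return fields
-- ===== SOURCE B (Python) =====
-- def _split_select_fields(select_part: str) -> list[str]: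
--     """Split SELECT fields by comma, respecting parentheses (index/slice based)."""
--     cuts = []
--     depth = 0
--     for i, ch in enumerate(select_part):
--         if ch == "(":
--             depth += 1
--         elif ch == ")":
--             depth -= 1
--         elif ch == "," and depth == 0:
--             cuts.append(i)
--     fields = []
--     start = 0
--     for i in cuts:
--         fields.append(select_part[start:i])
--         start = i + 1
--     last = select_part[start:]
--     if last.strip():
--         fields.append(last)
--     return fields
-- ===== Notes on version B (the rewrite author's own statement) =====
-- stated objective: alternative
-- what changed: B replaces A's single pass with string accumulation by a two-pass index scheme: pass one records the indices of depth-0 commas, pass two slices the segments out of the original string (last one kept only if its strip() is truthy).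
import Mathlib
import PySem

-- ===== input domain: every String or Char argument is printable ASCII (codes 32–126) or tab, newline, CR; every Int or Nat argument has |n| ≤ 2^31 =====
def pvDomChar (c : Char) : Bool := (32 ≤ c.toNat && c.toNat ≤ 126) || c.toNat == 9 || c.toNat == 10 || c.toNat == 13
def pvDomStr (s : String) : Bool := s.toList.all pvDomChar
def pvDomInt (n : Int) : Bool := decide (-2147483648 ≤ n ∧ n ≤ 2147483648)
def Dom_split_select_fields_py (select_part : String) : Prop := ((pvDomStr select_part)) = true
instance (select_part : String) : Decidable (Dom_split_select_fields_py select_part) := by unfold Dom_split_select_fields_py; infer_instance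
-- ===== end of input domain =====

-- B differs from A only in decomposition (comma indices + slicing instead of accumulating a
-- current string); same return value everywhere, equivalence of the RETURN value is proved.

-- ===== PORT A =====
-- A's for-loop as structural recursion over the characters, state (fields, depth, current);
-- the trailing `if current.strip()` is the base case.
def pvGoA (l : List Char) (fields : List (List Char)) (depth : Int) (current : List Char) :
    List (List Char) :=
  match l with
  | [] => if PySem.Chars.strip current ≠ [] then fields ++ [current] else fields
  | ch :: rest =>
    if ch = '(' then pvGoA rest fields (depth + 1) (current ++ [ch])
    else if ch = ')' then pvGoA rest fields (depth - 1) (current ++ [ch])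
    else if ch = ',' ∧ depth = 0 then pvGoA rest (fields ++ [current]) depth []
    else pvGoA rest fields depth (current ++ [ch])

def split_select_fields_py (select_part : String) : List String :=
  (pvGoA select_part.toList [] 0 []).map String.ofList

-- ===== PORT B =====
-- pass 1: indices of commas at parenthesis depth 0 (for i, ch in enumerate(...))
def pvGoCuts (l : List Char) (i depth : Int) : List Int :=
  match l with
  | [] => []
  | ch :: rest =>
    if ch = '(' then pvGoCuts rest (i + 1) (depth + 1)
    else if ch = ')' then pvGoCuts rest (i + 1) (depth - 1)
    else if ch = ',' ∧ depth = 0 then i :: pvGoCuts rest (i + 1) depth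
    else pvGoCuts rest (i + 1) depth

-- pass 2: slice the original string at those cuts; the final piece only if it strips nonempty
def pvGoParts (full : List Char) (cuts : List Int) (start : Int) : List (List Char) :=
  match cuts with
  | [] =>
    let last := PySem.List.slice full (some start) none
    if PySem.Chars.strip last ≠ [] then [last] else []
  | i :: rest => PySem.List.slice full (some start) (some i) :: pvGoParts full rest (i + 1)

def split_select_fields_py_alt (select_part : String) : List String :=
  (pvGoParts select_part.toList (pvGoCuts select_part.toList 0 0) 0).map String.ofList

-- ===== PRECONDITION & SPEC =====
def Spec_split_select_fields_py (select_part : String) (out : List String) : Prop := out = split_select_fields_py_alt select_part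
instance (select_part : String) (out : List String) : Decidable (Spec_split_select_fields_py select_part out) := by unfold Spec_split_select_fields_py; infer_instance

-- ===== CLAIM (what is proved, stated in full; the proofs are below) =====
def Claim_equal_split_select_fields_py : Prop := ∀ (select_part : String), Dom_split_select_fields_py select_part → Spec_split_select_fields_py select_part (split_select_fields_py select_part)

-- ===== LEMMAS AND PROOFS =====

-- Invariant: A's `current` is always the slice of the full string from the last cut end `c`
-- to the scan position `p`.
lemma pvKey (full : List Char) : ∀ (l : List Char) (p c : Nat) (depth : Int)
    (fields : List (List Char)), full.drop p = l → c ≤ p →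
    pvGoA l fields depth ((full.drop c).take (p - c)) =
      fields ++ pvGoParts full (pvGoCuts l (p : Int) depth) (c : Int) := by
  intro l
  induction l with
  | nil =>
    intro p c depth fields hdrop hcp
    have hlen : full.length ≤ p := by
      have := congrArg List.length hdrop
      simp at this; omega
    have hcur : (full.drop c).take (p - c) = full.drop c := by
      apply List.take_of_length_le
      simp; omega
    rw [pvGoA, pvGoCuts, pvGoParts]
    simp only [PySem.List.slice_from_natCast, hcur]
    split_ifs <;> simp
  | cons ch rest ih =>
    intro p c depth fields hdrop hcp
    have hp : p < full.length := by
      by_contra h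
      rw [List.drop_eq_nil_of_le (by omega)] at hdrop
      simp at hdrop
    have hget : full[p]? = some ch := by
      have := congrArg (·.head?) hdrop
      simpa [List.head?_drop] using this
    have hdrop' : full.drop (p + 1) = rest := by
      have := congrArg List.tail hdrop
      simpa [List.tail_drop] using this
    have hstep : ∀ c' : Nat, c' ≤ p →
        (full.drop c').take (p - c') ++ [ch] = (full.drop c').take (p + 1 - c') := by
      intro c' hc'
      have h1 : p + 1 - c' = (p - c') + 1 := by omega
      rw [h1, List.take_add_one]
      have h2 : (full.drop c')[p - c']? = some ch := by
        rw [List.getElem?_drop]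
        have : c' + (p - c') = p := by omega
        rw [this, hget]
      simp [h2]
    have hcast : ((p : Int) + 1) = ((p + 1 : Nat) : Int) := by push_cast; ring
    by_cases h1 : ch = '('
    · rw [pvGoA, pvGoCuts, if_pos h1, if_pos h1, hstep c hcp, hcast]
      exact ih (p + 1) c (depth + 1) fields hdrop' (by omega)
    · by_cases h2 : ch = ')'
      · rw [pvGoA, pvGoCuts, if_neg h1, if_neg h1, if_pos h2, if_pos h2, hstep c hcp, hcast]
        exact ih (p + 1) c (depth - 1) fields hdrop' (by omega)
      · by_cases h3 : ch = ',' ∧ depth = 0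
        · rw [pvGoA, pvGoCuts, if_neg h1, if_neg h1, if_neg h2, if_neg h2, if_pos h3, if_pos h3]
          rw [pvGoParts, PySem.List.slice_natCast]
          have hnil : ([] : List Char) = (full.drop (p + 1)).take (p + 1 - (p + 1)) := by simp
          rw [hnil]
          have := ih (p + 1) (p + 1) depth (fields ++ [(full.drop c).take (p - c)]) hdrop'
            (le_refl _)
          rw [this, List.append_assoc]
          push_cast
          rfl
        · rw [pvGoA, pvGoCuts, if_neg h1, if_neg h1, if_neg h2, if_neg h2, if_neg h3, if_neg h3,
            hstep c hcp, hcast]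
          exact ih (p + 1) c depth fields hdrop' (by omega)

-- ===== VERDICT (by name: the statement is the Claim_ definition above) =====
theorem split_select_fields_py_spec : Claim_equal_split_select_fields_py := by
  intro s _
  unfold Spec_split_select_fields_py split_select_fields_py split_select_fields_py_alt
  have h := pvKey s.toList s.toList 0 0 0 [] (by simp) (le_refl 0)
  simp at h
  rw [h]
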